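-- pv_equiv track=rewrite | github.com/danielmast/advent-of-code-2023 | day13/day13_2.py | check_other_columns
-- ===== SOURCE A (Python) =====
-- def get_diff(list1, list2):
--     diff = 0
--     for i in range(len(list1)):
--         if list1[i] != list2[i]:
--             diff += 1
--     return diff
--
-- def check_other_columns(pattern, c):
--     total_diff = 0
--     for i in range(c+1):
--         if c + 1 + i >= len(pattern[0]):
--             if total_diff == 1:
--                 return True
--             return False
--
--         diff = get_diff(get_column(pattern, c - i), get_column(pattern, c + 1 + i))
--         total_diff += diff
--         if total_diff > 1:
--             return False
--
--     if total_diff == 0: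
--         return False
--
--     return True
--
-- def get_column(pattern, i):
--     c = []
--     for r in pattern:
--         c.append(r[i])
--     return c
-- ===== SOURCE B (Python) =====
-- def check_other_columns(pattern, c):
--     width = len(pattern[0])
--     ov = max(0, min(c + 1, width - c - 1))
--     left = "".join(row[c + 1 - ov : c + 1][::-1] for row in pattern)
--     right = "".join(row[c + 1 : c + 1 + ov] for row in pattern)
--     return sum(a != b for a, b in zip(left, right)) == 1
-- ===== Notes on version B (the rewrite author's own statement) =====
-- stated objective: alternative
-- what changed: B replaces A's column-by-column loop (which rebuilds two full columns per step with get_column and diffs them with get_diff, with two early exits) by slicing: for each row it slices the reversed left block and the right block around c, joins them into two strings, and counts mismatches in one final zip pass, comparing the total to 1.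
-- outside the precondition, e.g. on check_other_columns([], -1): A returns False, B raises IndexError; on check_other_columns(['..#.#', '.##', '##.'], 1): A returns False, B returns True
import Mathlib
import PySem

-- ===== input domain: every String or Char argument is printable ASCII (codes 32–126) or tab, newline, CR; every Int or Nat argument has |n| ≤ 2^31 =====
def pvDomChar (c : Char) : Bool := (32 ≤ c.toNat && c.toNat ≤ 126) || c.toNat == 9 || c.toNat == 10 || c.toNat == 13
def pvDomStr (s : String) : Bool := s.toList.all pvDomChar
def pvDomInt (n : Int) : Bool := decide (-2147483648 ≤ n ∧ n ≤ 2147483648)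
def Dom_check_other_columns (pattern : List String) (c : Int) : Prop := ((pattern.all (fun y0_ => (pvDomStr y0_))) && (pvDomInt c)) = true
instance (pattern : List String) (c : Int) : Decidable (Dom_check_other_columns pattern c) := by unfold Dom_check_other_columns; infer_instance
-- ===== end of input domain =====

-- B replaces A's column-by-column loop by slicing: per row it takes the reversed left block and
-- the right block around c, joins them into two strings, and counts mismatches in one zip pass;
-- same return value on every input admitted by Pre_ (objective: alternative decomposition).

-- ===== PORT A =====
-- get_column(pattern, i): builds the column by appending r[i] per row (default only hit outside Pre_)
def pvGetColumn (pattern : List String) (i : Int) : List Char :=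
  pattern.foldl (fun acc r => acc ++ [(PySem.Str.pyGet? r i).getD ' ']) []

-- get_diff(list1, list2): counts indices i in range(len(list1)) with list1[i] != list2[i]
def pvGetDiff (l1 l2 : List Char) : Int :=
  (PySem.List.pyRange 0 (PySem.List.len l1) 1).foldl
    (fun d i => if PySem.List.pyGetD l1 i ' ' ≠ PySem.List.pyGetD l2 i ' ' then d + 1 else d) 0

-- the 'for i in range(c+1)' loop of A, with its early returns (range kept lazy, as a counter)
def pvLoopA (pattern : List String) (c : Int) (i : Int) (total : Int) : Bool :=
  if _h : i < c + 1 then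
    if PySem.Str.len (pattern.headD "") ≤ c + 1 + i then total == 1
    else
      if 1 < total + pvGetDiff (pvGetColumn pattern (c - i)) (pvGetColumn pattern (c + 1 + i))
      then false
      else pvLoopA pattern c (i + 1)
        (total + pvGetDiff (pvGetColumn pattern (c - i)) (pvGetColumn pattern (c + 1 + i)))
  else if total == 0 then false else true
termination_by (c + 1 - i).toNat
decreasing_by omega

def check_other_columns (pattern : List String) (c : Int) : Bool :=
  pvLoopA pattern c 0 0

-- ===== PORT B =====
def check_other_columns_alt (pattern : List String) (c : Int) : Bool :=
  let width := PySem.Str.len (pattern.headD "")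
  let ov := max 0 (min (c + 1) (width - c - 1))
  let left := PySem.Str.join "" (pattern.map (fun row =>
    (PySem.Str.slice? (PySem.Str.slice row (some (c + 1 - ov)) (some (c + 1))) none none (-1)).getD ""))
  let right := PySem.Str.join "" (pattern.map (fun row =>
    PySem.Str.slice row (some (c + 1)) (some (c + 1 + ov))))
  ((left.toList.zip right.toList).foldl (fun t p => if p.1 ≠ p.2 then t + 1 else t) (0 : Int)) == 1

-- ===== PRECONDITION & SPEC =====
-- Pre_ excludes the empty pattern (B's len(pattern[0]) raises IndexError where A can still
-- return False for c < 0) and ragged patterns with a row shorter than the compared block: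
-- there the Python A raises IndexError (pattern[0] or r[i]), except on corner inputs where an
-- early return fires first and A returns False while B's clamped slices can give a different
-- value; see the cites in the claim.
def Pre_check_other_columns (pattern : List String) (c : Int) : Prop :=
  pattern ≠ [] ∧
    (c + 1 ≤ 0 ∨ ((pattern.headD "").length : Int) ≤ c + 1 ∨
      ∀ r ∈ pattern,
        c + min (c + 1) (((pattern.headD "").length : Int) - c - 1) < (r.length : Int))
instance (pattern : List String) (c : Int) : Decidable (Pre_check_other_columns pattern c) := by
  unfold Pre_check_other_columns; infer_instance

def pvWitness_check_other_columns : List String × Int := (["#.#", "##."], 1)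

def Spec_check_other_columns (pattern : List String) (c : Int) (out : Bool) : Prop :=
  out = check_other_columns_alt pattern c
instance (pattern : List String) (c : Int) (out : Bool) : Decidable (Spec_check_other_columns pattern c out) := by
  unfold Spec_check_other_columns; infer_instance

-- ===== CLAIM (what is proved, stated in full; the proofs are below) =====
def Claim_equal_check_other_columns : Prop :=
  ∀ (pattern : List String) (c : Int), Dom_check_other_columns pattern c →
    Pre_check_other_columns pattern c →
    Spec_check_other_columns pattern c (check_other_columns pattern c)

-- ===== LEMMAS AND PROOFS =====

-- the per-row mismatch indicator both programs count
def pvInd (c : Int) (i : Int) (r : String) : Int :=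
  if (PySem.Str.pyGet? r (c - i)).getD ' ' ≠ (PySem.Str.pyGet? r (c + 1 + i)).getD ' ' then 1 else 0

-- the character-pair indicator of B's final zip pass
def pvChInd (p : Char × Char) : Int := if p.1 ≠ p.2 then 1 else 0

theorem pvGetColumn_eq_map (pattern : List String) (i : Int) :
    pvGetColumn pattern i = pattern.map (fun r => (PySem.Str.pyGet? r i).getD ' ') := by
  unfold pvGetColumn
  rw [PySem.List.foldl_append_singleton_eq_map]
  simp

theorem pvGetDiff_map (p : List String) (h1 h2 : String → Char) :
    pvGetDiff (p.map h1) (p.map h2)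
      = (p.map (fun r => if h1 r ≠ h2 r then (1 : Int) else 0)).sum := by
  induction p using List.reverseRecOn with
  | nil => simp [pvGetDiff, PySem.List.pyRange_one_eq_nil]
  | append_singleton p' r ih =>
    unfold pvGetDiff at *
    have hn : (PySem.List.len ((p' ++ [r]).map h1)) = (p'.length : Int) + 1 := by
      simp
    have hlen : (PySem.List.len (p'.map h1)) = (p'.length : Int) := by simp
    rw [hlen] at ih
    rw [hn, PySem.List.pyRange_one_succ_right (by positivity), List.foldl_append]
    simp only [List.foldl_cons, List.foldl_nil]
    have hcongr :
        (PySem.List.pyRange 0 (p'.length : Int) 1).foldl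
          (fun d i => if PySem.List.pyGetD ((p' ++ [r]).map h1) i ' '
              ≠ PySem.List.pyGetD ((p' ++ [r]).map h2) i ' ' then d + 1 else d) (0 : Int)
        = (PySem.List.pyRange 0 (p'.length : Int) 1).foldl
          (fun d i => if PySem.List.pyGetD (p'.map h1) i ' '
              ≠ PySem.List.pyGetD (p'.map h2) i ' ' then d + 1 else d) (0 : Int) := by
      apply PySem.List.foldl_congr_mem
      intro acc i hi
      rw [PySem.List.mem_pyRange_one] at hi
      obtain ⟨k, rfl⟩ : ∃ k : Nat, i = (k : Int) := ⟨i.toNat, by omega⟩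
      have hk : k < p'.length := by omega
      simp only [PySem.List.pyGetD_natCast]
      rw [List.getD_eq_getElem _ _ (by simp; omega), List.getD_eq_getElem _ _ (by simp; omega),
          List.getD_eq_getElem _ _ (by simp; omega), List.getD_eq_getElem _ _ (by simp; omega)]
      simp [hk]
    have hlast1 : PySem.List.pyGetD ((p' ++ [r]).map h1) (p'.length : Int) ' ' = h1 r := by
      rw [PySem.List.pyGetD_natCast, List.getD_eq_getElem _ _ (by simp)]
      simp
    have hlast2 : PySem.List.pyGetD ((p' ++ [r]).map h2) (p'.length : Int) ' ' = h2 r := by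
      rw [PySem.List.pyGetD_natCast, List.getD_eq_getElem _ _ (by simp)]
      simp
    rw [hcongr, hlast1, hlast2, ih, List.map_append, List.sum_append]
    by_cases h : h1 r = h2 r <;> simp [h]

theorem pvGetDiff_col (pattern : List String) (c i : Int) :
    pvGetDiff (pvGetColumn pattern (c - i)) (pvGetColumn pattern (c + 1 + i))
      = (pattern.map (pvInd c i)).sum := by
  rw [pvGetColumn_eq_map, pvGetColumn_eq_map, pvGetDiff_map]
  rfl

theorem pvInd_nonneg (c i : Int) (r : String) : 0 ≤ pvInd c i r := by
  unfold pvInd; split <;> omega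

theorem pvColSum_nonneg (pattern : List String) (c i : Int) :
    0 ≤ (pattern.map (pvInd c i)).sum := by
  apply List.sum_nonneg
  intro x hx
  obtain ⟨r, _, rfl⟩ := List.mem_map.mp hx
  exact pvInd_nonneg c i r

theorem pvTailSum_nonneg (pattern : List String) (c : Int) (l : List Int) :
    0 ≤ (l.map (fun i => (pattern.map (pvInd c i)).sum)).sum := by
  apply List.sum_nonneg
  intro x hx
  obtain ⟨i, _, rfl⟩ := List.mem_map.mp hx
  exact pvColSum_nonneg pattern c i

-- list view of A's loop, used only in the proofs below
def pvLoopL (pattern : List String) (c : Int) : List Int → Int → Bool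
  | [], total => if total == 0 then false else true
  | i :: rest, total =>
    if PySem.Str.len (pattern.headD "") ≤ c + 1 + i then total == 1
    else
      if 1 < total + pvGetDiff (pvGetColumn pattern (c - i)) (pvGetColumn pattern (c + 1 + i))
      then false
      else pvLoopL pattern c rest
        (total + pvGetDiff (pvGetColumn pattern (c - i)) (pvGetColumn pattern (c + 1 + i)))

theorem pvLoopA_eq_L (pattern : List String) (c : Int) :
    ∀ (n : Nat) (i t : Int), (c + 1 - i).toNat = n →
      pvLoopA pattern c i t = pvLoopL pattern c (PySem.List.pyRange i (c + 1) 1) t := by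
  intro n
  induction n with
  | zero =>
    intro i t hn
    rw [pvLoopA, dif_neg (by omega), PySem.List.pyRange_one_eq_nil (by omega)]
    simp [pvLoopL]
  | succ n ih =>
    intro i t hn
    rw [pvLoopA, dif_pos (by omega), PySem.List.pyRange_one_cons (by omega)]
    simp only [pvLoopL]
    by_cases hA : PySem.Str.len (pattern.headD "") ≤ c + 1 + i
    · rw [if_pos hA, if_pos hA]
    · rw [if_neg hA, if_neg hA]
      by_cases hB : 1 < t + pvGetDiff (pvGetColumn pattern (c - i)) (pvGetColumn pattern (c + 1 + i))
      · rw [if_pos hB, if_pos hB]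
      · rw [if_neg hB, if_neg hB, ih (i + 1) _ (by omega)]

-- A's loop computes: total + Σ of column diffs over the prefix where c+1+i < width, compared to 1
theorem pvLoopA_char (pattern : List String) (c : Int) :
    ∀ (l : List Int) (t : Int), 0 ≤ t → t ≤ 1 →
      pvLoopL pattern c l t
        = decide (t + ((l.takeWhile
            (fun i => decide (c + 1 + i < PySem.Str.len (pattern.headD "")))).map
            (fun i => (pattern.map (pvInd c i)).sum)).sum = 1) := by
  intro l
  induction l with
  | nil =>
    intro t h0 h1
    rcases (by omega : t = 0 ∨ t = 1) with rfl | rfl <;> simp [pvLoopL]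
  | cons i rest ih =>
    intro t h0 h1
    simp only [pvLoopL]
    by_cases hb : PySem.Str.len (pattern.headD "") ≤ c + 1 + i
    · rw [if_pos hb, List.takeWhile_cons,
          show (decide (c + 1 + i < PySem.Str.len (pattern.headD ""))) = false from
            decide_eq_false (by omega)]
      simp
      rfl
    · rw [if_neg hb, List.takeWhile_cons,
          show (decide (c + 1 + i < PySem.Str.len (pattern.headD ""))) = true from
            decide_eq_true (by omega)]
      rw [if_pos rfl, List.map_cons, List.sum_cons, pvGetDiff_col]
      set D := (pattern.map (pvInd c i)).sum with hD
      have hDnn : 0 ≤ D := pvColSum_nonneg pattern c i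
      set S := ((rest.takeWhile
            (fun i => decide (c + 1 + i < PySem.Str.len (pattern.headD "")))).map
            (fun i => (pattern.map (pvInd c i)).sum)).sum with hS
      have hSnn : 0 ≤ S := pvTailSum_nonneg pattern c _
      by_cases hgt : 1 < t + D
      · rw [if_pos hgt, decide_eq_false (show ¬ (t + (D + S) = 1) by omega)]
      · rw [if_neg hgt, ih (t + D) (by omega) (by omega), decide_eq_decide]
        omega

-- takeWhile of the break test on range(a, b) is range(a, min b m)
theorem pvTakeWhile_range (c W : Int) :
    ∀ (n : Nat) (a b : Int), (b - a).toNat = n →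
      (PySem.List.pyRange a b 1).takeWhile (fun i => decide (c + 1 + i < W))
        = PySem.List.pyRange a (min b (W - c - 1)) 1 := by
  intro n
  induction n with
  | zero =>
    intro a b hn
    rw [PySem.List.pyRange_one_eq_nil (by omega), PySem.List.pyRange_one_eq_nil (by omega)]
    simp
  | succ n ih =>
    intro a b hn
    rw [PySem.List.pyRange_one_cons (by omega), List.takeWhile_cons]
    by_cases hp : c + 1 + a < W
    · rw [decide_eq_true hp, if_pos rfl, ih (a + 1) b (by omega)]
      exact (PySem.List.pyRange_one_cons (by omega)).symm
    · rw [decide_eq_false hp, if_neg (by simp), PySem.List.pyRange_one_eq_nil (by omega)]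

-- exchanging the two summations
theorem pvSumSwap {α β : Type} (I : List α) (J : List β) (g : α → β → Int) :
    (I.map (fun i => (J.map (g i)).sum)).sum
      = (J.map (fun j => (I.map (fun i => g i j)).sum)).sum := by
  induction I with
  | nil => simp
  | cons i I ih =>
    simp only [List.map_cons, List.sum_cons, ih]
    rw [← PySem.List.sum_map_add_int]

-- A as a closed Boolean formula: Σ over the overlap of column diffs, compared to 1
theorem pvRangeMax (m : Int) : PySem.List.pyRange 0 m 1 = PySem.List.pyRange 0 (max 0 m) 1 := by
  by_cases h : m ≤ 0
  · rw [PySem.List.pyRange_one_eq_nil (by omega), PySem.List.pyRange_one_eq_nil (by omega)]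
  · rw [max_eq_right (by omega)]

theorem pvA_char (pattern : List String) (c : Int) :
    check_other_columns pattern c
      = decide ((pattern.map (fun r =>
          ((PySem.List.pyRange 0 (max 0 (min (c + 1) (PySem.Str.len (pattern.headD "") - c - 1))) 1).map
            (fun i => pvInd c i r)).sum)).sum = 1) := by
  rw [show check_other_columns pattern c = pvLoopA pattern c 0 0 from rfl,
      pvLoopA_eq_L pattern c (c + 1 - 0).toNat 0 0 rfl,
      pvLoopA_char pattern c _ 0 le_rfl (by omega),
      pvTakeWhile_range c (PySem.Str.len (pattern.headD "")) (c + 1 - 0).toNat 0 (c + 1) rfl,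
      pvSumSwap, pvRangeMax, zero_add]

theorem pvRowZip (l : List Char) (a n : Nat) (h : a + n + n ≤ l.length) :
    (((l.drop a).take n).reverse).zip ((l.drop (a + n)).take n)
      = (List.range n).map (fun k => (l.getD (a + n - 1 - k) ' ', l.getD (a + n + k) ' ')) := by
  apply List.ext_getElem
  · simp [List.length_zip]
    omega
  · intro i h1 h2
    have hi : i < n := by
      simp [List.length_zip] at h1
      omega
    rw [List.getElem_zip, List.getElem_map, List.getElem_range, List.getElem_reverse]
    rw [List.getElem_take, List.getElem_drop, List.getElem_take, List.getElem_drop]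
    rw [List.getD_eq_getElem _ _ (by omega), List.getD_eq_getElem _ _ (by omega)]
    rw [Prod.mk.injEq]
    refine ⟨?_, rfl⟩
    congr 1
    simp
    omega

theorem pvRowSum (r : String) (c ov : Int) (hov : 0 < ov) (hlow : 0 ≤ c + 1 - ov)
    (hup : c + 1 + ov ≤ (r.toList.length : Int)) :
    (((PySem.Chars.slice r.toList (some (c + 1 - ov)) (some (c + 1))).reverse.zip
        (PySem.Chars.slice r.toList (some (c + 1)) (some (c + 1 + ov)))).map pvChInd).sum
      = ((PySem.List.pyRange 0 ov 1).map (fun i => pvInd c i r)).sum := by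
  set l := r.toList with hl
  set a := (c + 1 - ov).toNat with ha
  set n := ov.toNat with hn
  have h1 : PySem.Chars.slice l (some (c + 1 - ov)) (some (c + 1)) = (l.drop a).take n := by
    rw [PySem.Chars.slice_eq_listSlice,
        PySem.List.slice_of_nonneg l hlow (by omega) (by omega) (by omega)]
    congr 1
    omega
  have h2 : PySem.Chars.slice l (some (c + 1)) (some (c + 1 + ov)) = (l.drop (a + n)).take n := by
    rw [PySem.Chars.slice_eq_listSlice,
        PySem.List.slice_of_nonneg l (by omega) (by omega) (by omega) (by omega)]
    congr 2
    omega
    omega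
  rw [h1, h2, pvRowZip l a n (by omega), List.map_map, PySem.List.pyRange_one, List.map_map]
  rw [show (ov - 0).toNat = n from by omega]
  congr 1
  apply List.map_congr_left
  intro k hk
  have hkn : k < n := by simpa using hk
  simp only [Function.comp_apply]
  unfold pvChInd pvInd
  have e1 : c - (0 + (k : Int)) = ((a + n - 1 - k : Nat) : Int) := by omega
  have e2 : c + 1 + (0 + (k : Int)) = ((a + n + k : Nat) : Int) := by push_cast; omega
  rw [e1, e2, PySem.Str.pyGet?_natCast, PySem.Str.pyGet?_natCast, ← hl]
  rw [List.getD_eq_getElem?_getD, List.getD_eq_getElem?_getD]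

theorem pvJoinNil (xss : List (List Char)) :
    PySem.Chars.join [] xss = xss.flatten := by
  match xss with
  | [] => simp [PySem.Chars.join_nil]
  | [p] => simp [PySem.Chars.join_singleton]
  | p :: q :: rest =>
    rw [PySem.Chars.join_cons_cons, pvJoinNil (q :: rest)]
    simp

theorem pvLeftToList (pattern : List String) (x y : Int) :
    (PySem.Str.join "" (pattern.map (fun row =>
        (PySem.Str.slice? (PySem.Str.slice row (some x) (some y)) none none (-1)).getD ""))).toList
      = (pattern.map (fun row =>
          (PySem.Chars.slice row.toList (some x) (some y)).reverse)).flatten := by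
  rw [PySem.Str.toList_join]
  have h0 : (String.toList "") = [] := by simp
  rw [h0, pvJoinNil, List.map_map]
  have hm : pattern.map (String.toList ∘ fun row =>
        (PySem.Str.slice? (PySem.Str.slice row (some x) (some y)) none none (-1)).getD "")
      = pattern.map (fun row => (PySem.Chars.slice row.toList (some x) (some y)).reverse) := by
    apply List.map_congr_left
    intro r _
    simp only [Function.comp_apply]
    rw [PySem.Str.slice?_none_none_neg_one, Option.getD_some, String.toList_ofList,
        PySem.Str.toList_slice]
  rw [hm]

theorem pvRightToList (pattern : List String) (x y : Int) :
    (PySem.Str.join "" (pattern.map (fun row =>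
        PySem.Str.slice row (some x) (some y)))).toList
      = (pattern.map (fun row => PySem.Chars.slice row.toList (some x) (some y))).flatten := by
  rw [PySem.Str.toList_join]
  have h0 : (String.toList "") = [] := by simp
  rw [h0, pvJoinNil, List.map_map]
  have hm : pattern.map (String.toList ∘ fun row => PySem.Str.slice row (some x) (some y))
      = pattern.map (fun row => PySem.Chars.slice row.toList (some x) (some y)) := by
    apply List.map_congr_left
    intro r _
    simp only [Function.comp_apply]
    rw [PySem.Str.toList_slice]
  rw [hm]

theorem pvZipFlatten {α : Type} (f g : α → List Char) (xs : List α)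
    (h : ∀ x ∈ xs, (f x).length = (g x).length) :
    (xs.map f).flatten.zip (xs.map g).flatten
      = (xs.map (fun x => (f x).zip (g x))).flatten := by
  induction xs with
  | nil => simp
  | cons x xs ih =>
    simp only [List.map_cons, List.flatten_cons]
    rw [List.zip_append (h x (by simp)), ih (fun y hy => h y (by simp [hy]))]

theorem pvCountFold (l : List (Char × Char)) :
    ∀ t : Int, l.foldl (fun t p => if p.1 ≠ p.2 then t + 1 else t) t = t + (l.map pvChInd).sum := by
  induction l with
  | nil => simp
  | cons p l ih =>
    intro t
    simp only [List.foldl_cons, List.map_cons, List.sum_cons, ih]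
    unfold pvChInd
    split <;> ring

theorem pvSliceSelf (l : List Char) (u : Int) : PySem.List.slice l (some u) (some u) = [] := by
  apply List.eq_nil_of_length_eq_zero
  rw [PySem.List.length_slice]
  omega

theorem pvB_char (pattern : List String) (c : Int)
    (hpre : Pre_check_other_columns pattern c) :
    check_other_columns_alt pattern c
      = decide ((pattern.map (fun r =>
          ((PySem.List.pyRange 0 (max 0 (min (c + 1) (PySem.Str.len (pattern.headD "") - c - 1))) 1).map
            (fun i => pvInd c i r)).sum)).sum = 1) := by
  unfold check_other_columns_alt
  simp only []
  set W := PySem.Str.len (pattern.headD "") with hW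
  set ov := max 0 (min (c + 1) (W - c - 1)) with hov
  rw [pvLeftToList, pvRightToList]
  by_cases hm : 0 < min (c + 1) (W - c - 1)
  · -- nontrivial overlap
    have hovm : ov = min (c + 1) (W - c - 1) := by omega
    have hWlen : W = ((pattern.headD "").length : Int) := by
      rw [hW, PySem.Str.len_eq]
      norm_cast
    have hall : ∀ r ∈ pattern, c + 1 + ov ≤ (r.toList.length : Int) := by
      intro r hr
      obtain ⟨hne, hd⟩ := hpre
      rcases hd with h | h | h
      · omega
      · omega
      · have hh := h r hr
        rw [← hWlen] at hh
        have hlt : (r.toList.length : Int) = (r.length : Int) := by norm_cast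
        omega
    have hlen : ∀ r ∈ pattern,
        ((PySem.Chars.slice r.toList (some (c + 1 - ov)) (some (c + 1))).reverse).length
          = (PySem.Chars.slice r.toList (some (c + 1)) (some (c + 1 + ov))).length := by
      intro r hr
      have hub := hall r hr
      rw [List.length_reverse, PySem.Chars.slice_eq_listSlice, PySem.Chars.slice_eq_listSlice,
          PySem.List.slice_of_nonneg r.toList (by omega) (by omega) (by omega) (by omega),
          PySem.List.slice_of_nonneg r.toList (by omega) (by omega) (by omega) (by omega)]
      rw [List.length_take, List.length_take, List.length_drop, List.length_drop]
      omega
    rw [pvZipFlatten _ _ _ hlen, pvCountFold, zero_add, List.map_flatten, List.sum_flatten]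
    have hrows : List.map List.sum (List.map (List.map pvChInd)
          (List.map (fun r =>
            (PySem.Chars.slice r.toList (some (c + 1 - ov)) (some (c + 1))).reverse.zip
              (PySem.Chars.slice r.toList (some (c + 1)) (some (c + 1 + ov)))) pattern))
        = pattern.map (fun r => ((PySem.List.pyRange 0 ov 1).map (fun i => pvInd c i r)).sum) := by
      rw [List.map_map, List.map_map]
      apply List.map_congr_left
      intro r hr
      simp only [Function.comp_apply]
      exact pvRowSum r c ov (by omega) (by omega) (hall r hr)
    rw [hrows]
    rfl
  · -- empty overlap: both joined strings are empty
    have hov0 : ov = 0 := by omega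
    have hch : ∀ r ∈ pattern,
        (PySem.Chars.slice r.toList (some (c + 1 - ov)) (some (c + 1))).reverse = ([] : List Char) := by
      intro r _
      rw [hov0, show c + 1 - (0 : Int) = c + 1 from by ring, PySem.Chars.slice_eq_listSlice,
          pvSliceSelf]
      rfl
    have hflat : (pattern.map (fun row =>
        (PySem.Chars.slice row.toList (some (c + 1 - ov)) (some (c + 1))).reverse)).flatten
        = ([] : List Char) := by
      rw [List.flatten_eq_nil_iff]
      intro l hl
      obtain ⟨r, hr, rfl⟩ := List.mem_map.mp hl
      exact hch r hr
    rw [hflat]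
    simp only [List.zip_nil_left, List.foldl_nil]
    rw [hov0, PySem.List.pyRange_one_eq_nil le_rfl]
    simp

-- ===== VERDICT (by name: the statement is the Claim_ definition above) =====
theorem check_other_columns_spec : Claim_equal_check_other_columns := by
  intro pattern c _ hpre
  unfold Spec_check_other_columns
  rw [pvA_char, pvB_char pattern c hpre]
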